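-- pv_equiv track=rewrite | github.com/let942/trybe-algorithms | challenges/challenge_find_the_duplicate.py | duplicated_or_none
-- ===== SOURCE A (Python) =====
-- def duplicated_or_none(nums):
--     uniq_nums = set()
--     duplicated = None
--     for num in nums:
--         if type(num) != int or num < 1:
--             return None
--         if num in uniq_nums:
--             duplicated = num
--         else:
--             uniq_nums.add(num)
--     return duplicated
-- ===== SOURCE B (Python) =====
-- def duplicated_or_none(nums):
--     nums = list(nums)
--     if any(type(n) != int or n < 1 for n in nums):
--         return None
--     for i in range(len(nums) - 1, 0, -1):
--         if nums[i] in nums[:i]: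
--             return nums[i]
--     return None
-- ===== Notes on version B (the rewrite author's own statement) =====
-- stated objective: alternative
-- what changed: A makes one forward pass maintaining a seen set and a last-duplicate accumulator; B validates with any(...) and then scans BACKWARDS with an early return, returning the first element (from the right) that also occurs earlier in the list, with no seen set or accumulator at all (trades A's O(n) for an O(n^2) membership scan).
import Mathlib
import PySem

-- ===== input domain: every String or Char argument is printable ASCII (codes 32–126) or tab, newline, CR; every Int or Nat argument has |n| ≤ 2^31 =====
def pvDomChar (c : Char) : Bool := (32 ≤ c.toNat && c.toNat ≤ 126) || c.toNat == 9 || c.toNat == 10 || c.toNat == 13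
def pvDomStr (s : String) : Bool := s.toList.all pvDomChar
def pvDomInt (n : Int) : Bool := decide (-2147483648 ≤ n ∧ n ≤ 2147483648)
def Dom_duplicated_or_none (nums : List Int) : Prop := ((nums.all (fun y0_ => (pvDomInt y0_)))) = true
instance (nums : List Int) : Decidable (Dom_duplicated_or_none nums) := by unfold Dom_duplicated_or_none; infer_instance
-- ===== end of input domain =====

-- B replaces A's forward seen-set/last-duplicate-accumulator pass by a validation pass plus a backward early-return scan ("first element from the right that also occurs earlier"), with no set and no accumulator (alternative decomposition; not faster).
-- ===== PORT A =====
-- A's loop: validate-and-detect interleaved, early return None on invalid element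
def dupGoA (seen : PySem.Set Int) (dup : Option Int) : List Int → Option Int
  | [] => dup
  | n :: rest =>
    if n < 1 then none
    else if PySem.Set.contains seen n then dupGoA seen (some n) rest
    else dupGoA (PySem.Set.add seen n) dup rest

def duplicated_or_none (nums : List Int) : Option Int :=
  dupGoA (PySem.Set.ofList []) none nums

-- ===== PORT B =====
-- B's backward loop 'for i in range(len(nums)-1, 0, -1)': every index i visited is in range,
-- so nums[i] is List.getD and the slice nums[:i] (i ≥ 1) is List.take i — exact on those indices.
def dupBack (nums : List Int) : Nat → Option Int
  | 0 => none
  | (i+1) =>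
    if (nums.take (i+1)).contains (nums.getD (i+1) 0) then some (nums.getD (i+1) 0)
    else dupBack nums i

def duplicated_or_none_alt (nums : List Int) : Option Int :=
  if nums.any (fun n => decide (n < 1)) then none
  else dupBack nums (nums.length - 1)

-- ===== PRECONDITION & SPEC =====
def Spec_duplicated_or_none (nums : List Int) (out : Option Int) : Prop := out = duplicated_or_none_alt nums
instance (nums : List Int) (out : Option Int) : Decidable (Spec_duplicated_or_none nums out) := by unfold Spec_duplicated_or_none; infer_instance

-- ===== CLAIM (what is proved, stated in full; the proofs are below) =====
def Claim_equal_duplicated_or_none : Prop := ∀ (nums : List Int), Dom_duplicated_or_none nums → Spec_duplicated_or_none nums (duplicated_or_none nums)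

-- ===== LEMMAS AND PROOFS =====

-- proof-side helper: A's loop with the validation branch stripped (used on valid inputs only)
def dupGoB (seen : PySem.Set Int) (dup : Option Int) : List Int → Option Int
  | [] => dup
  | n :: rest =>
    if PySem.Set.contains seen n then dupGoB seen (some n) rest
    else dupGoB (PySem.Set.add seen n) dup rest

theorem dupGoA_eq_goB (l : List Int) (h : l.any (fun n => decide (n < 1)) = false) :
    ∀ seen dup, dupGoA seen dup l = dupGoB seen dup l := by
  induction l with
  | nil => intro seen dup; rfl
  | cons n rest ih =>
    intro seen dup
    simp only [List.any_cons, Bool.or_eq_false_iff, decide_eq_false_iff_not] at h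
    simp only [dupGoA, dupGoB]
    rw [if_neg h.1]
    split
    · exact ih h.2 _ _
    · exact ih h.2 _ _

theorem dupGoA_invalid (l : List Int) (h : l.any (fun n => decide (n < 1)) = true) :
    ∀ seen dup, dupGoA seen dup l = none := by
  induction l with
  | nil => simp at h
  | cons n rest ih =>
    intro seen dup
    simp only [List.any_cons, Bool.or_eq_true, decide_eq_true_eq] at h
    simp only [dupGoA]
    by_cases hn : n < 1
    · rw [if_pos hn]
    · rw [if_neg hn]
      have hr : rest.any (fun n => decide (n < 1)) = true := by
        rcases h with h | h
        · omega
        · exact h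
      by_cases hc : PySem.Set.contains seen n = true
      · rw [if_pos hc]; exact ih hr _ _
      · rw [if_neg hc]; exact ih hr _ _

theorem contains_add_eq (seen : PySem.Set Int) (m n : Int) :
    PySem.Set.contains (PySem.Set.add seen m) n = (PySem.Set.contains seen n || (n == m)) := by
  rw [Bool.eq_iff_iff]
  simp [PySem.Set.mem_add, beq_iff_eq]

theorem goB_concat (l : List Int) (n : Int) :
    ∀ seen dup, dupGoB seen dup (l ++ [n]) =
      if (PySem.Set.contains seen n || l.contains n) = true then some n else dupGoB seen dup l := by
  induction l with
  | nil =>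
    intro seen dup
    simp only [List.nil_append, dupGoB, List.contains, List.elem_nil, Bool.or_false]
  | cons m rest ih =>
    intro seen dup
    simp only [List.cons_append, dupGoB]
    by_cases hm : PySem.Set.contains seen m = true
    · rw [if_pos hm, if_pos hm, ih]
      by_cases hnm : n = m
      · subst hnm
        have hn : n ∈ seen := by simpa [List.contains_iff_mem] using hm
        simp [hn]
      · have h1 : (m :: rest).contains n = rest.contains n := by
          rw [Bool.eq_iff_iff]
          simp [hnm]
        rw [h1]
    · rw [if_neg hm, if_neg hm, ih, contains_add_eq]
      have h1 : (m :: rest).contains n = ((n == m) || rest.contains n) := by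
        rw [Bool.eq_iff_iff]
        simp [beq_iff_eq]
      rw [h1]
      have : (PySem.Set.contains seen n || n == m || rest.contains n)
           = (PySem.Set.contains seen n || (n == m || rest.contains n)) := by
        rw [Bool.or_assoc]
      rw [this]

theorem dupBack_prefix (l : List Int) (n : Int) :
    ∀ i, i < l.length → dupBack (l ++ [n]) i = dupBack l i := by
  intro i
  induction i with
  | zero => intro _; rfl
  | succ j ih =>
    intro hj
    have htake : (l ++ [n]).take (j+1) = l.take (j+1) :=
      List.take_append_of_le_length (by omega)
    have hget : (l ++ [n]).getD (j+1) 0 = l.getD (j+1) 0 := by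
      simp [List.getD, List.getElem?_append_left (by omega : j+1 < l.length)]
    simp only [dupBack, htake, hget]
    rw [ih (by omega)]

theorem goB_eq_dupBack (l : List Int) :
    dupGoB (PySem.Set.ofList []) none l = dupBack l (l.length - 1) := by
  induction l using List.reverseRecOn with
  | nil => rfl
  | append_singleton l n ih =>
    rw [goB_concat]
    have hcs : PySem.Set.contains (PySem.Set.ofList ([] : List Int)) n = false := rfl
    rw [hcs, Bool.false_or]
    cases l with
    | nil => simp [dupBack, dupGoB]
    | cons m rest =>
      have hlen : ((m :: rest) ++ [n]).length - 1 = rest.length + 1 := by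
        simp
      rw [hlen]
      have hL : (m :: rest).length = rest.length + 1 := rfl
      have htake : ((m :: rest) ++ [n]).take (rest.length + 1) = m :: rest := by
        rw [List.take_append_of_le_length (by simp)]
        rw [show rest.length + 1 = (m :: rest).length from by simp, List.take_length]
      have hget : ((m :: rest) ++ [n]).getD (rest.length + 1) 0 = n := by
        have h : (m :: rest).length ≤ rest.length + 1 := by simp
        simp [List.getD]
      simp only [dupBack, htake, hget]
      rw [dupBack_prefix (m :: rest) n rest.length (by simp)]
      rw [ih]
      have : (m :: rest).length - 1 = rest.length := by simp
      rw [this]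

-- ===== VERDICT (by name: the statement is the Claim_ definition above) =====
theorem duplicated_or_none_spec : Claim_equal_duplicated_or_none := by
  intro nums _
  unfold Spec_duplicated_or_none duplicated_or_none duplicated_or_none_alt
  cases hany : nums.any (fun n => decide (n < 1)) with
  | true => rw [if_pos rfl]; exact dupGoA_invalid nums hany _ _
  | false =>
    rw [if_neg Bool.false_ne_true, dupGoA_eq_goB nums hany, goB_eq_dupBack]
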